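-- pv_equiv track=rewrite | github.com/GoldenKerwin/CodeFuse-CGM | get_S2ORC/graph_index.py | build_neighbors
-- ===== SOURCE A (Python) =====
-- from collections import Counter, defaultdict
-- from typing import Any
--
-- def build_neighbors(
--     edges: list[dict[str, Any]],
--     direction: str = "outgoing",
--     max_neighbors: int = 50,
-- ) -> dict[str, list[str]]:
--     nbrs: dict[str, list[str]] = defaultdict(list)
--     for e in edges:
--         s, d = e["src_paper_id"], e["dst_paper_id"]
--         if direction in ("outgoing", "both"):
--             nbrs[s].append(d)
--         if direction in ("incoming", "both"):
--             nbrs[d].append(s)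
--
--     capped: dict[str, list[str]] = {}
--     for pid, arr in nbrs.items():
--         seen = []
--         used = set()
--         for x in arr:
--             if x in used:
--                 continue
--             used.add(x)
--             seen.append(x)
--             if len(seen) >= max_neighbors:
--                 break
--         capped[pid] = seen
--     return capped
-- ===== SOURCE B (Python) =====
-- def build_neighbors(
--     edges,
--     direction="outgoing",
--     max_neighbors=50,
-- ):
--     # One fused pass over the edges: dedup and cap while appending, instead of
--     # building full adjacency lists first and trimming them in a second pass.
--     result = {}
--     seen = {}
--     outgoing = direction in ("outgoing", "both")
--     incoming = direction in ("incoming", "both")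
--     for e in edges:
--         s, d = e["src_paper_id"], e["dst_paper_id"]
--         ps = []
--         if outgoing:
--             ps.append((s, d))
--         if incoming:
--             ps.append((d, s))
--         for pid, nbr in ps:
--             lst = result.get(pid)
--             if lst is None:
--                 result[pid] = [nbr]
--                 seen[pid] = {nbr}
--             elif len(lst) >= max_neighbors or nbr in seen[pid]:
--                 continue
--             else:
--                 lst.append(nbr)
--                 seen[pid].add(nbr)
--     return result
-- ===== Notes on version B (the rewrite author's own statement) =====
-- stated objective: alternative
-- what changed: B builds the capped, deduplicated neighbor lists in a single pass over the edges with per-pid seen-sets (add-then-check against the cap), instead of A's two stages of first accumulating full adjacency lists in a defaultdict and then dedup/capping each list in a second loop.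
import Mathlib
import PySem

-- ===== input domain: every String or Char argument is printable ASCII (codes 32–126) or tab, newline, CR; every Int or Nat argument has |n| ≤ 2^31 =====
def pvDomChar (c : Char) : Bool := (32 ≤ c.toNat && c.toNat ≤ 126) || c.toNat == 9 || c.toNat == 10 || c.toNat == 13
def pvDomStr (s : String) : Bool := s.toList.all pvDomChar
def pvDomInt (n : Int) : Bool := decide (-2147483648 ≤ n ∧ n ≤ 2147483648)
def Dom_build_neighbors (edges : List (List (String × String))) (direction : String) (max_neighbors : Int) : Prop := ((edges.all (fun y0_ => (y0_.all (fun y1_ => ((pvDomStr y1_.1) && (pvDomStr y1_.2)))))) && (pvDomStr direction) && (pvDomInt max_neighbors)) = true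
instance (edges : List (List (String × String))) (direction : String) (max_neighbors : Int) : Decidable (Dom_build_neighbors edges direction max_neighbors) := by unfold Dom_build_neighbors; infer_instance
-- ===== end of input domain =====

-- B fuses A's two passes into one: it dedups and caps per pid while scanning the edges, keeping a
-- per-pid seen-set, instead of building full adjacency lists and trimming them in a second pass
-- (objective: alternative).

-- s, d = e["src_paper_id"], e["dst_paper_id"]  (none = KeyError, excluded by Pre_; both Pythons do these lookups)
def edgeSD (e : List (String × String)) : Option (String × String) :=
  match (PySem.Dict.mk e).get? "src_paper_id", (PySem.Dict.mk e).get? "dst_paper_id" with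
  | some s, some d => some (s, d)
  | _, _ => none

-- ===== PORT A =====
-- inner dedup/cap loop of A: seen/used accumulators, break when len(seen) >= max_neighbors
def bnA_dedup (m : Int) : List String → List String → PySem.Set String → List String
  | [], seen, _ => seen
  | x :: rest, seen, used =>
    if PySem.Set.contains used x then bnA_dedup m rest seen used
    else
      let seen' := seen ++ [x]
      if (seen'.length : Int) ≥ m then seen'
      else bnA_dedup m rest seen' (PySem.Set.add used x)

-- body of A's first loop: the two conditional appends into the defaultdict
def bnA_addEdge (direction : String) (nbrs : PySem.Dict String (List String))
    (e : List (String × String)) : PySem.Dict String (List String) :=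
  match edgeSD e with
  | none => nbrs
  | some (s, d) =>
    let nbrs := if direction = "outgoing" ∨ direction = "both" then nbrs.insert s (nbrs.getD s [] ++ [d]) else nbrs
    if direction = "incoming" ∨ direction = "both" then nbrs.insert d (nbrs.getD d [] ++ [s]) else nbrs

def build_neighbors (edges : List (List (String × String))) (direction : String) (max_neighbors : Int) : List (String × List String) :=
  let nbrs := edges.foldl (bnA_addEdge direction) PySem.Dict.empty
  let capped := nbrs.items.foldl
    (fun (c : PySem.Dict String (List String)) p => c.insert p.1 (bnA_dedup max_neighbors p.2 [] PySem.Set.empty))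
    PySem.Dict.empty
  capped.items

-- ===== PORT B =====
-- one (pid, nbr) step of B: create, skip (full or already seen), or append + record
def bnB_step (m : Int) (st : PySem.Dict String (List String) × PySem.Dict String (PySem.Set String))
    (p : String × String) : PySem.Dict String (List String) × PySem.Dict String (PySem.Set String) :=
  match st.1.get? p.1 with
  | none => (st.1.insert p.1 [p.2], st.2.insert p.1 (PySem.Set.ofList [p.2]))
  | some lst =>
    if ((lst.length : Int) ≥ m) ∨ (PySem.Set.contains (st.2.getD p.1 PySem.Set.empty) p.2 = true) then st
    else (st.1.insert p.1 (lst ++ [p.2]),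
          st.2.insert p.1 (PySem.Set.add (st.2.getD p.1 PySem.Set.empty) p.2))

-- body of B's single loop: build ps for the edge, then run the step on each pair
def bnB_addEdge (direction : String) (m : Int)
    (st : PySem.Dict String (List String) × PySem.Dict String (PySem.Set String))
    (e : List (String × String)) : PySem.Dict String (List String) × PySem.Dict String (PySem.Set String) :=
  match edgeSD e with
  | none => st
  | some (s, d) =>
    ((if direction = "outgoing" ∨ direction = "both" then [(s, d)] else []) ++
     (if direction = "incoming" ∨ direction = "both" then [(d, s)] else [])).foldl (bnB_step m) st

def build_neighbors_alt (edges : List (List (String × String))) (direction : String) (max_neighbors : Int) : List (String × List String) :=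
  (edges.foldl (bnB_addEdge direction max_neighbors) (PySem.Dict.empty, PySem.Dict.empty)).1.items

-- ===== PRECONDITION & SPEC =====
-- Pre_ excludes exactly the edges on which Python A raises KeyError (a missing "src_paper_id"/"dst_paper_id" key)
def Pre_build_neighbors (edges : List (List (String × String))) (direction : String) (max_neighbors : Int) : Prop :=
  (edges.all (fun e => (PySem.Dict.mk e).contains "src_paper_id" && (PySem.Dict.mk e).contains "dst_paper_id")) = true
instance (edges : List (List (String × String))) (direction : String) (max_neighbors : Int) : Decidable (Pre_build_neighbors edges direction max_neighbors) := by unfold Pre_build_neighbors; infer_instance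

def pvWitness_build_neighbors : (List (List (String × String))) × String × Int :=
  ([[("src_paper_id", "a"), ("dst_paper_id", "b")], [("src_paper_id", "b"), ("dst_paper_id", "a")]], "both", 2)

def Spec_build_neighbors (edges : List (List (String × String))) (direction : String) (max_neighbors : Int) (out : List (String × List String)) : Prop := out = build_neighbors_alt edges direction max_neighbors
instance (edges : List (List (String × String))) (direction : String) (max_neighbors : Int) (out : List (String × List String)) : Decidable (Spec_build_neighbors edges direction max_neighbors out) := by unfold Spec_build_neighbors; infer_instance

-- ===== CLAIM (what is proved, stated in full; the proofs are below) =====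
def Claim_equal_build_neighbors : Prop := ∀ (edges : List (List (String × String))) (direction : String) (max_neighbors : Int), Dom_build_neighbors edges direction max_neighbors → Pre_build_neighbors edges direction max_neighbors → Spec_build_neighbors edges direction max_neighbors (build_neighbors edges direction max_neighbors)

-- ===== LEMMAS AND PROOFS =====

-- the (pid, neighbour) pairs one edge contributes, in processing order
def edgePairs (direction : String) (e : List (String × String)) : List (String × String) :=
  match edgeSD e with
  | none => []
  | some (s, d) =>
    (if direction = "outgoing" ∨ direction = "both" then [(s, d)] else []) ++
    (if direction = "incoming" ∨ direction = "both" then [(d, s)] else [])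

-- one append into A's defaultdict
def insPair (n : PySem.Dict String (List String)) (p : String × String) : PySem.Dict String (List String) :=
  n.insert p.1 (n.getD p.1 [] ++ [p.2])

lemma bnA_addEdge_eq (direction : String) (n : PySem.Dict String (List String)) (e : List (String × String)) :
    bnA_addEdge direction n e = (edgePairs direction e).foldl insPair n := by
  unfold bnA_addEdge edgePairs
  cases h : edgeSD e with
  | none => rfl
  | some sd =>
    obtain ⟨s, d⟩ := sd
    split_ifs with h1 h2 h2 <;> simp [insPair]

lemma bnA_fold_eq_pairs (direction : String) :
    ∀ (edges : List (List (String × String))) (n : PySem.Dict String (List String)),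
    edges.foldl (bnA_addEdge direction) n = (edges.flatMap (edgePairs direction)).foldl insPair n := by
  intro edges
  induction edges with
  | nil => intro n; rfl
  | cons e t ih => intro n; simp [List.flatMap_cons, List.foldl_append, ih, bnA_addEdge_eq]

lemma bnB_fold_eq_pairs (direction : String) (m : Int) :
    ∀ (edges : List (List (String × String)))
      (st : PySem.Dict String (List String) × PySem.Dict String (PySem.Set String)),
    edges.foldl (bnB_addEdge direction m) st = (edges.flatMap (edgePairs direction)).foldl (bnB_step m) st := by
  intro edges
  induction edges with
  | nil => intro st; rfl
  | cons e t ih =>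
    intro st
    have he : bnB_addEdge direction m st e = (edgePairs direction e).foldl (bnB_step m) st := by
      unfold bnB_addEdge edgePairs
      cases h : edgeSD e with
      | none => rfl
      | some sd => obtain ⟨s, d⟩ := sd; rfl
    simp [List.flatMap_cons, List.foldl_append, ih, he]

lemma bnA_dedup_length_mono (m : Int) :
    ∀ (rest seen : List String) (used : PySem.Set String),
    seen.length ≤ (bnA_dedup m rest seen used).length := by
  intro rest
  induction rest with
  | nil => intro seen used; simp [bnA_dedup]
  | cons x t ih =>
    intro seen used
    rw [bnA_dedup]
    cases h1 : PySem.Set.contains used x with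
    | true => simp only [if_true]; exact ih seen used
    | false =>
      simp only [Bool.false_eq_true, if_false]
      split
      · simp
      · exact le_trans (by simp) (ih (seen ++ [x]) _)

lemma bnA_dedup_ne_nil (m : Int) (arr : List String) (h : arr ≠ []) :
    bnA_dedup m arr [] PySem.Set.empty ≠ [] := by
  cases arr with
  | nil => exact absurd rfl h
  | cons a t =>
    rw [bnA_dedup]
    have hc : PySem.Set.contains (PySem.Set.empty : PySem.Set String) a = false := rfl
    simp only [hc, Bool.false_eq_true, if_false]
    split
    · simp
    · intro hnil
      have := bnA_dedup_length_mono m t ([] ++ [a]) (PySem.Set.add PySem.Set.empty a)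
      rw [hnil] at this
      simp at this

lemma bnA_dedup_singleton (m : Int) (x : String) : bnA_dedup m [x] [] PySem.Set.empty = [x] := by
  rw [bnA_dedup]
  have hc : PySem.Set.contains (PySem.Set.empty : PySem.Set String) x = false := rfl
  simp only [hc, Bool.false_eq_true, if_false]
  split
  · rfl
  · rfl

-- appending one element to the scanned list extends the dedup/cap result by the add-then-check rule
lemma bnA_dedup_snoc (m : Int) (x : String) :
    ∀ (rest seen : List String) (used : PySem.Set String),
    (∀ y, y ∈ used ↔ y ∈ seen) → (seen = [] ∨ (seen.length : Int) < m) →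
    bnA_dedup m (rest ++ [x]) seen used =
      (if bnA_dedup m rest seen used ≠ [] ∧ ((bnA_dedup m rest seen used).length : Int) ≥ m then
        bnA_dedup m rest seen used
      else if x ∈ bnA_dedup m rest seen used then bnA_dedup m rest seen used
      else bnA_dedup m rest seen used ++ [x]) := by
  intro rest
  induction rest with
  | nil =>
    intro seen used hmem hlen
    have hne : ¬(seen ≠ [] ∧ (seen.length : Int) ≥ m) := by
      rcases hlen with h | h
      · subst h; simp
      · intro ⟨_, h2⟩; omega
    have e : bnA_dedup m [] seen used = seen := rfl
    rw [e, if_neg hne, List.nil_append, bnA_dedup]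
    cases hx : PySem.Set.contains used x with
    | true =>
      have hxs : x ∈ seen := (hmem x).mp (by simpa using hx)
      rw [if_pos hxs]
      simp [e]
    | false =>
      have hxs : x ∉ seen := fun h => by
        have := (hmem x).mpr h
        rw [← PySem.Set.contains_iff, hx] at this
        exact Bool.false_ne_true this
      rw [if_neg hxs]
      simp only [Bool.false_eq_true, if_false]
      split <;> rfl
  | cons r rs ih =>
    intro seen used hmem hlen
    simp only [List.cons_append, bnA_dedup]
    cases hr : PySem.Set.contains used r with
    | true => exact ih seen used hmem hlen
    | false =>
      simp only [Bool.false_eq_true, if_false]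
      split
      · rename_i hge
        rw [if_pos ⟨by simp, hge⟩]
      · rename_i hlt
        refine ih (seen ++ [r]) (PySem.Set.add used r) ?_ ?_
        · intro y
          rw [PySem.Set.mem_add]
          simp [hmem y]
        · right
          simp only [List.length_append, List.length_cons, List.length_nil] at hlt ⊢
          omega

-- looking a key up in a value-mapped dict
lemma get?_mk_map {β γ : Type} (f : β → γ) :
    ∀ (l : List (String × β)) (k : String),
    (PySem.Dict.mk (l.map (fun p => (p.1, f p.2)))).get? k = ((PySem.Dict.mk l).get? k).map f := by
  intro l
  induction l with
  | nil => intro k; rfl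
  | cons p t ih =>
    intro k
    obtain ⟨a, b⟩ := p
    simp only [List.map_cons, PySem.Dict.get?_mk_cons]
    cases h : (a == k) <;> simp [h, ih]

-- the invariant tying B's one-pass state to A's full adjacency dict
lemma bn_invariant (m : Int) (L : List (String × String)) :
    (L.foldl (bnB_step m) (PySem.Dict.empty, PySem.Dict.empty)).1.items =
      (L.foldl insPair PySem.Dict.empty).items.map (fun p => (p.1, bnA_dedup m p.2 [] PySem.Set.empty))
    ∧ (L.foldl (bnB_step m) (PySem.Dict.empty, PySem.Dict.empty)).2.items =
      (L.foldl insPair PySem.Dict.empty).items.map (fun p => (p.1, PySem.Set.ofList (bnA_dedup m p.2 [] PySem.Set.empty)))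
    ∧ (L.foldl insPair PySem.Dict.empty).keys.Nodup
    ∧ ∀ q ∈ (L.foldl insPair PySem.Dict.empty).items, q.2 ≠ [] := by
  induction L using List.reverseRecOn with
  | nil => exact ⟨rfl, rfl, List.nodup_nil, by intro q hq; simp [PySem.Dict.empty] at hq⟩
  | append_singleton L p ih =>
    obtain ⟨h1, h2, h3, h4⟩ := ih
    obtain ⟨pid, x⟩ := p
    rw [List.foldl_append, List.foldl_append]
    simp only [List.foldl_cons, List.foldl_nil]
    set n := L.foldl insPair PySem.Dict.empty with hn
    set st := L.foldl (bnB_step m) (PySem.Dict.empty, PySem.Dict.empty) with hst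
    have hmk1 : st.1 = PySem.Dict.mk (n.items.map (fun p => (p.1, bnA_dedup m p.2 [] PySem.Set.empty))) :=
      PySem.Dict.ext h1
    have hmk2 : st.2 = PySem.Dict.mk (n.items.map (fun p => (p.1, PySem.Set.ofList (bnA_dedup m p.2 [] PySem.Set.empty)))) :=
      PySem.Dict.ext h2
    have hnmk : PySem.Dict.mk n.items = n := PySem.Dict.ext rfl
    have hg1 : st.1.get? pid = (n.get? pid).map (fun a => bnA_dedup m a [] PySem.Set.empty) := by
      rw [hmk1, get?_mk_map (fun a => bnA_dedup m a [] PySem.Set.empty) n.items pid, hnmk]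
    have hg2 : st.2.get? pid = (n.get? pid).map (fun a => PySem.Set.ofList (bnA_dedup m a [] PySem.Set.empty)) := by
      rw [hmk2, get?_mk_map (fun a => PySem.Set.ofList (bnA_dedup m a [] PySem.Set.empty)) n.items pid, hnmk]
    cases hget : n.get? pid with
    | none =>
      have hc : n.contains pid = false := by rw [PySem.Dict.contains_eq_isSome_get?, hget]; rfl
      have hcB : st.1.contains pid = false := by
        rw [PySem.Dict.contains_eq_isSome_get?, hg1, hget]; rfl
      have hins : insPair n (pid, x) = n.insert pid [x] := by
        unfold insPair
        rw [PySem.Dict.getD_of_not_contains n [] hc]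
        rfl
      have hstep : bnB_step m st (pid, x) = (st.1.insert pid [x], st.2.insert pid (PySem.Set.ofList [x])) := by
        unfold bnB_step
        rw [hg1, hget]
        rfl
      rw [hins, hstep]
      have hAitems := PySem.Dict.items_insert_of_not_contains n ([x] : List String) hc
      have hBitems := PySem.Dict.items_insert_of_not_contains st.1 ([x] : List String) hcB
      have hB2items := PySem.Dict.items_insert_of_not_contains st.2 (PySem.Set.ofList [x]) (by
        rw [PySem.Dict.contains_eq_isSome_get?, hg2, hget]; rfl)
      refine ⟨?_, ?_, ?_, ?_⟩
      · rw [hBitems, hAitems, h1, List.map_append]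
        simp only [List.map_cons, List.map_nil, List.append_cancel_left_eq, List.cons.injEq,
          Prod.mk.injEq, true_and, and_true]
        exact (bnA_dedup_singleton m x).symm
      · rw [hB2items, hAitems, h2, List.map_append]
        simp only [List.map_cons, List.map_nil, List.append_cancel_left_eq, List.cons.injEq,
          Prod.mk.injEq, true_and, and_true]
        exact congrArg PySem.Set.ofList (bnA_dedup_singleton m x).symm
      · rw [PySem.Dict.keys_insert_of_not_contains n ([x] : List String) hc]
        have hpid : pid ∉ n.keys := (PySem.Dict.get?_eq_none_iff_not_mem_keys n pid).mp hget
        rw [List.nodup_append]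
        refine ⟨h3, List.nodup_singleton _, ?_⟩
        intro a ha b hb he
        have hab : b = pid := by simpa using hb
        exact hpid (hab ▸ he ▸ ha)
      · intro q hq
        rw [hAitems] at hq
        rcases List.mem_append.mp hq with h | h
        · exact h4 q h
        · simp at h; subst h; simp
    | some arr =>
      have harr : arr ≠ [] := h4 (pid, arr) (PySem.Dict.mem_items_of_get?_eq_some n hget)
      have hc : n.contains pid = true := by rw [PySem.Dict.contains_eq_isSome_get?, hget]; rfl
      have hgetD : n.getD pid [] = arr := PySem.Dict.getD_of_get?_eq_some n [] hget
      have hins : insPair n (pid, x) = n.insert pid (arr ++ [x]) := by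
        unfold insPair; rw [hgetD]
      set s := bnA_dedup m arr [] PySem.Set.empty with hsdef
      have hs : s ≠ [] := bnA_dedup_ne_nil m arr harr
      have hsnoc : bnA_dedup m (arr ++ [x]) [] PySem.Set.empty =
          (if s ≠ [] ∧ ((s.length : Int) ≥ m) then s else if x ∈ s then s else s ++ [x]) :=
        bnA_dedup_snoc m x arr [] PySem.Set.empty (fun y => Iff.rfl) (Or.inl rfl)
      have hg1s : st.1.get? pid = some s := by rw [hg1, hget]; rfl
      have hg2s : st.2.get? pid = some (PySem.Set.ofList s) := by rw [hg2, hget]; rfl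
      have hgD2 : st.2.getD pid PySem.Set.empty = PySem.Set.ofList s :=
        PySem.Dict.getD_of_get?_eq_some st.2 PySem.Set.empty hg2s
      have hcB : st.1.contains pid = true := by
        rw [PySem.Dict.contains_eq_isSome_get?, hg1s]; rfl
      have hcB2 : st.2.contains pid = true := by
        rw [PySem.Dict.contains_eq_isSome_get?, hg2s]; rfl
      have hcont : PySem.Set.contains (PySem.Set.ofList s) x = true ↔ x ∈ s := by
        rw [PySem.Set.contains_iff, PySem.Set.mem_ofList]
      have hval : ∀ q ∈ n.items, (q.1 == pid) = true → q.2 = arr := by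
        intro q hq hqe
        have heq : q.1 = pid := by simpa using hqe
        have := PySem.Dict.get?_of_mem_items n (k := q.1) (v := q.2) (by simpa using hq) h3
        rw [heq, hget] at this
        exact (Option.some.injEq _ _).mp this.symm
      by_cases hskip : ((s.length : Int) ≥ m) ∨ x ∈ s
      · -- B skips; A's new value dedups to the same s
        have hsnoc' : bnA_dedup m (arr ++ [x]) [] PySem.Set.empty = s := by
          rw [hsnoc]
          rcases hskip with h | h
          · rw [if_pos ⟨hs, h⟩]
          · split
            · rfl
            · simp [h]
        have hstep : bnB_step m st (pid, x) = st := by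
          unfold bnB_step
          rw [hg1s]
          simp only []
          rw [if_pos]
          rcases hskip with h | h
          · exact Or.inl h
          · exact Or.inr (by rw [hgD2]; exact hcont.mpr h)
        rw [hins, hstep]
        have hAitems := PySem.Dict.items_insert_of_contains n (arr ++ [x]) hc
        refine ⟨?_, ?_, ?_, ?_⟩
        · rw [h1, hAitems, List.map_map]
          refine (List.map_congr_left ?_)
          intro q hq
          by_cases hqe : (q.1 == pid) = true
          · have heq : q.1 = pid := by simpa using hqe
            have hq2 : q.2 = arr := hval q hq hqe
            simp [Function.comp, hqe, heq, hq2]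
            exact hsnoc'.symm
          · simp [Function.comp, hqe]
        · rw [h2, hAitems, List.map_map]
          refine (List.map_congr_left ?_)
          intro q hq
          by_cases hqe : (q.1 == pid) = true
          · have heq : q.1 = pid := by simpa using hqe
            have hq2 : q.2 = arr := hval q hq hqe
            simp [Function.comp, hqe, heq, hq2]
            exact congrArg PySem.Set.ofList hsnoc'.symm
          · simp [Function.comp, hqe]
        · rw [PySem.Dict.keys_insert_of_contains n (arr ++ [x]) hc]; exact h3
        · intro q hq
          rw [hAitems] at hq
          obtain ⟨q', hq', hqeq⟩ := List.mem_map.mp hq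
          by_cases hb : (q'.1 == pid) = true
          · rw [if_pos hb] at hqeq; subst hqeq; simp
          · rw [if_neg hb] at hqeq; subst hqeq; exact h4 q' hq'
      · -- B appends; A's new value dedups to s ++ [x]
        push_neg at hskip
        obtain ⟨hlen, hxs⟩ := hskip
        have hsnoc' : bnA_dedup m (arr ++ [x]) [] PySem.Set.empty = s ++ [x] := by
          rw [hsnoc, if_neg (by intro ⟨_, h⟩; omega), if_neg hxs]
        have hstep : bnB_step m st (pid, x) =
            (st.1.insert pid (s ++ [x]), st.2.insert pid (PySem.Set.add (PySem.Set.ofList s) x)) := by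
          unfold bnB_step
          rw [hg1s]
          simp only []
          rw [if_neg, hgD2]
          rw [hgD2]
          intro h
          rcases h with h | h
          · omega
          · exact hxs (hcont.mp h)
        rw [hins, hstep]
        have hAitems := PySem.Dict.items_insert_of_contains n (arr ++ [x]) hc
        have hBitems := PySem.Dict.items_insert_of_contains st.1 (s ++ [x]) hcB
        have hB2items := PySem.Dict.items_insert_of_contains st.2 (PySem.Set.add (PySem.Set.ofList s) x) hcB2
        refine ⟨?_, ?_, ?_, ?_⟩
        · rw [hBitems, h1, hAitems, List.map_map, List.map_map]
          refine (List.map_congr_left ?_)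
          intro q hq
          by_cases hqe : (q.1 == pid) = true
          · have heq : q.1 = pid := by simpa using hqe
            have hq2 : q.2 = arr := hval q hq hqe
            simp [Function.comp, hqe, heq, hq2]
            exact hsnoc'.symm
          · simp [Function.comp, hqe]
        · rw [hB2items, h2, hAitems, List.map_map, List.map_map]
          refine (List.map_congr_left ?_)
          intro q hq
          by_cases hqe : (q.1 == pid) = true
          · have heq : q.1 = pid := by simpa using hqe
            have hq2 : q.2 = arr := hval q hq hqe
            simp [Function.comp, hqe, heq, hq2]
            exact (PySem.Set.ofList_append_singleton s x).symm.trans (congrArg PySem.Set.ofList hsnoc'.symm)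
          · simp [Function.comp, hqe]
        · rw [PySem.Dict.keys_insert_of_contains n (arr ++ [x]) hc]; exact h3
        · intro q hq
          rw [hAitems] at hq
          obtain ⟨q', hq', hqeq⟩ := List.mem_map.mp hq
          by_cases hb : (q'.1 == pid) = true
          · rw [if_pos hb] at hqeq; subst hqeq; simp
          · rw [if_neg hb] at hqeq; subst hqeq; exact h4 q' hq'

theorem bn_main (edges : List (List (String × String))) (direction : String) (m : Int) :
    build_neighbors edges direction m = build_neighbors_alt edges direction m := by
  unfold build_neighbors build_neighbors_alt
  rw [bnA_fold_eq_pairs, bnB_fold_eq_pairs]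
  obtain ⟨h1, h2, h3, h4⟩ := bn_invariant m (edges.flatMap (edgePairs direction))
  have hfold := PySem.Dict.items_foldl_insert_fresh
    ((edges.flatMap (edgePairs direction)).foldl insPair PySem.Dict.empty).items
    (fun p : String × List String => p.1)
    (fun p => bnA_dedup m p.2 [] PySem.Set.empty)
    PySem.Dict.empty
    (fun a _ => PySem.Dict.contains_empty a.1)
    h3
  rw [hfold]
  simpa using h1.symm

-- ===== VERDICT (by name: the statement is the Claim_ definition above) =====
theorem build_neighbors_spec : Claim_equal_build_neighbors := by
  intro edges direction max_neighbors _dom _pre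
  exact bn_main edges direction max_neighbors
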